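-- pv_equiv track=rewrite | github.com/Adith1207/problem_Solving | diseasedString.py | contaminated
-- ===== SOURCE A (Python) =====
-- def contaminated(str,target):
--     l1 = list(str)
--     c = 1
--
--     while True:
--         i=1
--         deleted=False
--         while i<len(l1):
--             if l1[i]==target:
--                 del l1[i-1]
--                 deleted = True
--                 i = max(1,i-1)
--             else:
--                 i+=1
--         c+=1
--         if not deleted:
--             break
--
--     return c
-- ===== SOURCE B (Python) =====
-- def contaminated(str, target):
--     # One scan: the simulation always finishes after one deleting round,
--     # so the answer is 3 iff target matches a character at index >= 1, else 2.
--     return 3 if target in list(str)[1:] else 2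
-- ===== Notes on version B (the rewrite author's own statement) =====
-- stated objective: faster
-- what changed: Replaced the repeated delete-and-rescan simulation with a single membership test of target among the characters of str[1:], since one deleting round always suffices and the round count is 3 exactly when such a match exists.
import Mathlib
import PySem

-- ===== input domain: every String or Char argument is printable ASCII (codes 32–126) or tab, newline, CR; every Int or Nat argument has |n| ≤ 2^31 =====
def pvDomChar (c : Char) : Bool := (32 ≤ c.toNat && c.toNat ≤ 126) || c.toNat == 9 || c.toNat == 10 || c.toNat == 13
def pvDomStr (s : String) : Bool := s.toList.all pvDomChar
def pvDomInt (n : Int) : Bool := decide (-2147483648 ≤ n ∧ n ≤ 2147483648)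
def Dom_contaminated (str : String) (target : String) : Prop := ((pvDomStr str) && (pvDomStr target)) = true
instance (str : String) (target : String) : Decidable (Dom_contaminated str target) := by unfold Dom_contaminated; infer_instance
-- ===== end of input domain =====

-- B replaces A's repeated delete-and-rescan simulation by a single membership test on str[1:] (faster, one scan).


-- ===== PORT A =====
-- list(str): Python iterates a string into one-character strings
def pvListOfStr (s : String) : List String := s.toList.map (fun c => String.ofList [c])

-- the inner `while i < len(l1)` loop of A; state is (l1, i, deleted).
-- fuel is a totality guard only: each iteration strictly decreases 2*len(l1) - i,
-- and once i ≥ len(l1) the fuel-0 value coincides with the loop's exit value,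
-- so the fuel passed by pvRound is always sufficient (pvInner_snd etc. prove the
-- loop's behaviour under exactly that sufficiency bound).
def pvInner (target : String) : Nat → List String → Nat → Bool → List String × Bool
  | 0, l1, _, d => (l1, d)
  | fuel + 1, l1, i, d =>
    if h : i < l1.length then
      if l1[i] == target then
        -- del l1[i-1]; deleted = True; i = max(1, i-1)
        pvInner target fuel (l1.eraseIdx (i - 1)) (max 1 (i - 1)) true
      else
        pvInner target fuel l1 (i + 1) d
    else (l1, d)

-- one execution of the inner loop from i = 1, deleted = False, with sufficient fuel
def pvRound (target : String) (l1 : List String) : List String × Bool :=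
  pvInner target (2 * l1.length + 1) l1 1 false

-- the outer `while True` loop of A; c is Python's running round counter.
-- fuel is again only a totality guard: every round that repeats shrinks the list,
-- so the fuel passed by contaminated is always sufficient.
def pvOuter (target : String) : Nat → List String → Int → Int
  | 0, _, c => c
  | fuel + 1, l1, c =>
    match pvRound target l1 with
    | (l1', deleted) => if deleted then pvOuter target fuel l1' (c + 1) else c + 1

def contaminated (str : String) (target : String) : Int :=
  pvOuter target ((pvListOfStr str).length + 1) (pvListOfStr str) 1

-- ===== PORT B =====
-- `target in list(str)[1:]`: slice then membership among one-character strings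
def contaminated_alt (str : String) (target : String) : Int :=
  if (PySem.List.slice (pvListOfStr str) (some 1) none).contains target then 3 else 2

-- ===== PRECONDITION & SPEC =====
def Spec_contaminated (str : String) (target : String) (out : Int) : Prop := out = contaminated_alt str target
instance (str : String) (target : String) (out : Int) : Decidable (Spec_contaminated str target out) := by unfold Spec_contaminated; infer_instance

-- ===== CLAIM (what is proved, stated in full; the proofs are below) =====
def Claim_equal_contaminated : Prop := ∀ (str : String) (target : String), Dom_contaminated str target → Spec_contaminated str target (contaminated str target)

-- ===== LEMMAS AND PROOFS =====

-- with sufficient fuel, the deleted flag of a round is exactly "a match exists at index ≥ i"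
theorem pvInner_snd (target : String) (fuel : Nat) :
    ∀ (l1 : List String) (i : Nat) (d : Bool), 2 * l1.length ≤ fuel + i →
      (pvInner target fuel l1 i d).2 = (d || (l1.drop i).contains target) := by
  induction fuel with
  | zero =>
      intro l1 i d hf
      have : l1.length ≤ i := by omega
      rw [pvInner, List.drop_eq_nil_of_le this]
      simp
  | succ fuel ih =>
      intro l1 i d hf
      rw [pvInner]
      split
      · rename_i h
        have hE : (l1.eraseIdx (i - 1)).length = l1.length - 1 := by
          have : i - 1 < l1.length := by omega
          simp [List.length_eraseIdx, this]
        split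
        · rename_i heq
          rw [ih _ _ _ (by omega)]
          simp at heq
          have hm : target ∈ l1.drop i := by
            rw [List.drop_eq_getElem_cons h]; simp [heq]
          simp [hm]
        · rename_i heq
          rw [ih _ _ _ (by omega)]
          have hcons : l1.drop i = l1[i] :: l1.drop (i + 1) := List.drop_eq_getElem_cons h
          simp at heq
          have hne : ¬ target = l1[i] := fun hc => heq hc.symm
          have hiff : (target ∈ List.drop i l1) ↔ (target ∈ List.drop (i + 1) l1) := by
            rw [hcons, List.mem_cons]; exact or_iff_right hne
          simp only [List.contains_eq_mem]
          rw [decide_eq_decide.mpr hiff]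
      · rename_i h
        rw [List.drop_eq_nil_of_le (by omega)]
        simp

-- after a round started at i ≥ 1 with no match below i, no match remains at any index ≥ 1
theorem pvInner_clears (target : String) (fuel : Nat) :
    ∀ (l1 : List String) (i : Nat) (d : Bool), 1 ≤ i → 2 * l1.length ≤ fuel + i →
      (∀ j, 1 ≤ j → j < i → l1[j]? ≠ some target) →
      target ∉ (pvInner target fuel l1 i d).1.drop 1 := by
  induction fuel with
  | zero =>
      intro l1 i d hi hf hinv
      rw [pvInner]
      intro hmem
      obtain ⟨j, hj, hget⟩ := List.getElem_of_mem hmem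
      simp at hj
      have hj' : 1 + j < l1.length := by omega
      have hd : l1[1 + j]? = some target := by
        rw [List.getElem?_eq_getElem hj']
        rw [← List.getElem_drop]; exact congrArg some hget; simp; omega
      exact hinv (1 + j) (by omega) (by omega) hd
  | succ fuel ih =>
      intro l1 i d hi hf hinv
      rw [pvInner]
      split
      · rename_i h
        have hE : (l1.eraseIdx (i - 1)).length = l1.length - 1 := by
          have : i - 1 < l1.length := by omega
          simp [List.length_eraseIdx, this]
        split
        · rename_i heq
          apply ih _ _ _ (by omega) (by omega)
          intro j hj1 hj2
          have hj3 : j < i - 1 := by omega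
          rw [List.getElem?_eraseIdx_of_lt hj3]
          exact hinv j hj1 (by omega)
        · rename_i heq
          apply ih _ _ _ (by omega) (by omega)
          intro j hj1 hj2
          by_cases hji : j = i
          · subst hji
            simp at heq
            simp [List.getElem?_eq_getElem h]
            simpa using heq
          · exact hinv j hj1 (by omega)
      · rename_i h
        intro hmem
        obtain ⟨j, hj, hget⟩ := List.getElem_of_mem hmem
        simp at hj
        have hj' : 1 + j < l1.length := by omega
        have hd : l1[1 + j]? = some target := by
          rw [List.getElem?_eq_getElem hj']
          rw [← List.getElem_drop]; exact congrArg some hget; simp; omega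
        exact hinv (1 + j) (by omega) (by omega) hd

-- a round with no match at index ≥ i is the identity
theorem pvInner_id (target : String) (fuel : Nat) :
    ∀ (l1 : List String) (i : Nat) (d : Bool), target ∉ l1.drop i →
      pvInner target fuel l1 i d = (l1, d) := by
  induction fuel with
  | zero => intro l1 i d _; rw [pvInner]
  | succ fuel ih =>
      intro l1 i d hno
      rw [pvInner]
      split
      · rename_i h
        split
        · rename_i heq
          exfalso; apply hno
          rw [List.drop_eq_getElem_cons h]
          simp at heq; simp [heq]
        · rename_i heq
          apply ih; intro hc; apply hno
          rw [List.drop_eq_getElem_cons h]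
          exact List.mem_cons_of_mem _ hc
      · rfl

-- ===== VERDICT (by name: the statement is the Claim_ definition above) =====
theorem contaminated_spec : Claim_equal_contaminated := by
  intro str target _
  unfold Spec_contaminated contaminated contaminated_alt
  rw [PySem.List.slice_from_one, ← List.drop_one]
  set l1 := pvListOfStr str with hl1
  by_cases hmem : target ∈ l1.drop 1
  · -- round 1 deletes, round 2 does not: result 3
    have hlen : 2 ≤ l1.length := by
      have := List.length_drop (l := l1) (i := 1)
      have hpos : 0 < (l1.drop 1).length := List.length_pos_of_mem hmem
      omega
    have hsnd : (pvRound target l1).2 = true := by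
      unfold pvRound
      rw [pvInner_snd target _ l1 1 false (by omega)]
      simpa using hmem
    obtain ⟨l1', d, hr⟩ : ∃ a b, pvRound target l1 = (a, b) := ⟨_, _, rfl⟩
    have hd : d = true := by rw [hr] at hsnd; exact hsnd
    subst hd
    have hclear : target ∉ l1'.drop 1 := by
      have := pvInner_clears target (2 * l1.length + 1) l1 1 false (le_refl 1)
        (by omega) (by intro j h1 h2; omega)
      rw [show pvInner target (2 * l1.length + 1) l1 1 false = pvRound target l1 from rfl,
        hr] at this
      exact this
    obtain ⟨fuel, hfuel⟩ : ∃ f, l1.length + 1 = f + 2 := ⟨l1.length - 1, by omega⟩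
    rw [hfuel, pvOuter, hr]
    simp only [if_pos]
    rw [pvOuter]
    rw [show pvRound target l1' = (l1', false) from pvInner_id target _ l1' 1 false hclear]
    simp [← List.drop_one, hmem]
  · -- no deleting round: result 2
    rw [pvOuter]
    rw [show pvRound target l1 = (l1, false) from pvInner_id target _ l1 1 false hmem]
    simp [← List.drop_one, hmem]
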